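-- pv_equiv track=rewrite | github.com/RIXIX/algorithm | algorithm/tree/Greedy.py | solution
-- ===== SOURCE A (Python) =====
-- def solution(k, m, score):
--     answer = 0
--     c=0
--     score = sorted(score,reverse=True)
--     box_len = len(score)//m
--     # min_lst = min(lst)
--     # answer = min_lst*m*
--     for _ in range(box_len):
--         ss = score[0+c:m+c]
--         min_val = min(ss)
--         answer += min_val*m
--         c+=m
--
--     return answer
-- ===== SOURCE B (Python) =====
-- def _merge(xs, ys):
--     out = []
--     i = j = 0
--     while i < len(xs) and j < len(ys):
--         if xs[i] <= ys[j]: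
--             out.append(xs[i]); i += 1
--         else:
--             out.append(ys[j]); j += 1
--     out.extend(xs[i:])
--     out.extend(ys[j:])
--     return out
--
-- def _msort(xs):
--     if len(xs) <= 1:
--         return list(xs)
--     h = len(xs) // 2
--     return _merge(_msort(xs[:h]), _msort(xs[h:]))
--
-- def solution(k, m, score):
--     # Hand-rolled ASCENDING merge sort; drop the n - box_len*m smallest leftovers,
--     # then each group's minimum is the FIRST element of each m-block of the suffix.
--     box_len = len(score) // m
--     s = _msort(score)
--     total = 0
--     i = len(s) - box_len * m
--     for _ in range(box_len):
--         total += s[i]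
--         i += m
--     return m * total
-- ===== Notes on version B (the rewrite author's own statement) =====
-- stated objective: alternative
-- what changed: B replaces A's builtin descending sort plus per-chunk min() scans with a hand-rolled ascending merge sort, drops the n - box_len*m smallest leftovers, and sums the head of each m-block of the remaining suffix (the group minimum) in one indexed pass.
import Mathlib
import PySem

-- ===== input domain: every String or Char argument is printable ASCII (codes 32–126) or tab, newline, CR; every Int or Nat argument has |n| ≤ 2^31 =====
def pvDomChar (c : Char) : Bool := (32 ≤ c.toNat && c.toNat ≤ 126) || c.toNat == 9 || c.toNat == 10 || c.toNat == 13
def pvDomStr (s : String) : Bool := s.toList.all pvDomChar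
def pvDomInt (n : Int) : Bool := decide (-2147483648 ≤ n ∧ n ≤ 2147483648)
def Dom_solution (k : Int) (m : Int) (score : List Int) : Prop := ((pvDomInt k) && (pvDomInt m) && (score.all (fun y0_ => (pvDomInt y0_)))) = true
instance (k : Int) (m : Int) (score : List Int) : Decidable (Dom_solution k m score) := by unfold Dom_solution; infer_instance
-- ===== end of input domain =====

-- B replaces A's builtin descending sort + per-chunk min() scans by a hand-rolled ascending merge
-- sort followed by one indexed pass over the block heads of the kept suffix: alternative algorithm, same cost.

-- ===== PORT A =====
def solution (k : Int) (m : Int) (score : List Int) : Int :=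
  let score' := PySem.List.sorted score (fun x => x) true
  let box_len := PySem.Int.floordiv (score'.length : Int) m
  let st := (PySem.List.pyRange 0 box_len 1).foldl
    (fun (st : Int × Int) _ =>
      let ss := PySem.List.slice score' (some (0 + st.2)) (some (m + st.2))
      let min_val := (PySem.List.min? ss (fun x => x)).getD 0   -- min(ss); never [] inside Pre_
      (st.1 + min_val * m, st.2 + m)) ((0 : Int), (0 : Int))
  st.1

-- ===== PORT B =====
-- _merge(xs, ys): the while loop consumes the two lists front to front; structural recursion on the
-- two suffixes is the same computation (out is built front to back).
def mergeL : List Int → List Int → List Int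
  | [], ys => ys
  | x :: xs, [] => x :: xs
  | x :: xs, y :: ys =>
      if x ≤ y then x :: mergeL xs (y :: ys) else y :: mergeL (x :: xs) ys

-- _msort(xs); xs[:h] / xs[h:] with h = len//2 (0 ≤ h ≤ len) are exactly take h / drop h
def msortL (xs : List Int) : List Int :=
  if xs.length ≤ 1 then xs
  else mergeL (msortL (xs.take (xs.length / 2))) (msortL (xs.drop (xs.length / 2)))
termination_by xs.length
decreasing_by
  · simp only [List.length_take]; omega
  · simp only [List.length_drop]; omega

def solution_alt (k : Int) (m : Int) (score : List Int) : Int :=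
  let box_len := PySem.Int.floordiv (score.length : Int) m
  let s := msortL score
  let st := (PySem.List.pyRange 0 box_len 1).foldl
    (fun (st : Int × Int) _ => (st.1 + PySem.List.pyGetD s st.2 0, st.2 + m))
    ((0 : Int), (s.length : Int) - box_len * m)   -- s[i]; i always in range inside Pre_
  m * st.1

-- ===== PRECONDITION & SPEC =====
-- Pre_ excludes exactly m = 0, where both A and B raise ZeroDivisionError at len(score)//m.
def Pre_solution (k : Int) (m : Int) (score : List Int) : Prop := m ≠ 0
instance (k : Int) (m : Int) (score : List Int) : Decidable (Pre_solution k m score) := by unfold Pre_solution; infer_instance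
def pvWitness_solution : Int × Int × List Int := (0, 2, [3, 1, 2])

def Spec_solution (k : Int) (m : Int) (score : List Int) (out : Int) : Prop := out = solution_alt k m score
instance (k : Int) (m : Int) (score : List Int) (out : Int) : Decidable (Spec_solution k m score out) := by unfold Spec_solution; infer_instance

-- ===== CLAIM (what is proved, stated in full; the proofs are below) =====
def Claim_equal_solution : Prop := ∀ (k : Int) (m : Int) (score : List Int), Dom_solution k m score → Pre_solution k m score → Spec_solution k m score (solution k m score)

-- ===== LEMMAS AND PROOFS =====

-- floor division of a nonnegative number by a negative one is ≤ 0
lemma floordiv_nonpos {n m : Int} (hn : 0 ≤ n) (hm : m < 0) :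
    PySem.Int.floordiv n m ≤ 0 := by
  have h := PySem.Int.floordiv_mul_add_mod n m
  have hb := PySem.Int.mod_neg_bounds n hm
  nlinarith [h, hb.1, hb.2]

-- min of a nonempty descending-sorted list is its last element
lemma min_desc_eq_getLast (xs : List Int) (hne : xs ≠ [])
    (hs : xs.Pairwise (fun a b => b ≤ a)) :
    (PySem.List.min? xs (fun x => x)).getD 0 = xs.getLast hne := by
  cases hmin : PySem.List.min? xs (fun x => x) with
  | none => exact absurd ((PySem.List.min?_eq_none_iff xs _).mp hmin) hne
  | some v =>
    have hv_mem : v ∈ xs := PySem.List.min?_mem hmin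
    have hv_min : ∀ y ∈ xs, v ≤ y := PySem.List.min?_isMin hmin
    have hlast_mem : xs.getLast hne ∈ xs := List.getLast_mem hne
    have hlast_le : ∀ y ∈ xs, xs.getLast hne ≤ y := by
      intro y hy
      rw [List.pairwise_iff_getElem] at hs
      obtain ⟨i, hi, rfl⟩ := List.mem_iff_getElem.mp hy
      rw [List.getLast_eq_getElem]
      rcases Nat.lt_or_ge i (xs.length - 1) with h | h
      · exact hs i (xs.length - 1) hi (by omega) h
      · have : i = xs.length - 1 := by omega
        subst this; exact le_refl _
    simp only [Option.getD_some]
    exact le_antisymm (hv_min _ hlast_mem) (hlast_le _ hv_mem)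

-- the minimum of the i-th descending chunk is the boundary element s[i*mn + (mn-1)]
lemma chunk_min (s : List Int) (hs : s.Pairwise (fun a b => b ≤ a))
    (mn : Nat) (hmn : 0 < mn) (i : Nat) (h : (i + 1) * mn ≤ s.length) :
    (PySem.List.min? (PySem.List.slice s (some ((i * mn : Nat) : Int))
        (some (((i * mn : Nat) : Int) + (mn : Int)))) (fun x => x)).getD 0
      = s.getD (i * mn + (mn - 1)) 0 := by
  have hexp : (i + 1) * mn = i * mn + mn := by ring
  rw [hexp] at h
  rw [PySem.List.slice_natCast_add]
  set ss := (s.drop (i * mn)).take mn with hss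
  have hlen : ss.length = mn := by
    simp [hss]; omega
  have hne : ss ≠ [] := by
    intro hnil; rw [hnil] at hlen; simp at hlen; omega
  have hsorted : ss.Pairwise (fun a b => b ≤ a) :=
    List.Pairwise.take (List.Pairwise.drop hs)
  rw [min_desc_eq_getLast ss hne hsorted]
  rw [List.getLast_eq_getElem]
  have hidx : i * mn + (mn - 1) < s.length := by omega
  rw [List.getD_eq_getElem s 0 hidx]
  have hgt : ∀ (hq : mn - 1 < ss.length), ss[mn - 1]'hq = s[i * mn + (mn - 1)]'hidx := by
    intro hq
    simp only [hss]
    rw [List.getElem_take, List.getElem_drop]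
  simp only [hlen]
  exact hgt _

abbrev aStep (s : List Int) (m : Int) : Int × Int → Int → Int × Int :=
  fun st _ =>
    (st.1 + (PySem.List.min? (PySem.List.slice s (some (0 + st.2)) (some (m + st.2)))
        (fun x => x)).getD 0 * m, st.2 + m)

-- closed form of A's loop after j iterations
lemma A_loop (s : List Int) (m : Int) (j : Nat) :
    (PySem.List.pyRange 0 (j : Int) 1).foldl (aStep s m) (0, 0) =
      (((List.range j).map (fun i : Nat =>
          (PySem.List.min? (PySem.List.slice s (some (0 + (i : Int) * m))
            (some (m + (i : Int) * m))) (fun x => x)).getD 0 * m)).sum,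
       (j : Int) * m) := by
  induction j with
  | zero => simp [PySem.List.pyRange_one_eq_nil]
  | succ j ih =>
    have hsplit : PySem.List.pyRange 0 ((j : Int) + 1) 1 =
        PySem.List.pyRange 0 (j : Int) 1 ++ [(j : Int)] :=
      PySem.List.pyRange_one_succ_right (by positivity)
    rw [show (((j + 1 : Nat)) : Int) = (j : Int) + 1 by push_cast; ring, hsplit,
        List.foldl_append, ih]
    simp only [aStep, List.foldl_cons, List.foldl_nil, List.range_succ,
      List.map_append, List.sum_append, List.map_cons, List.map_nil, List.sum_cons,
      List.sum_nil]
    simp only [Prod.mk.injEq]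
    constructor <;> ring

-- merge is a permutation of the concatenation
lemma mergeL_perm (xs ys : List Int) : (mergeL xs ys).Perm (xs ++ ys) := by
  induction xs generalizing ys with
  | nil => simp [mergeL]
  | cons x xs ih =>
    induction ys with
    | nil => simp [mergeL]
    | cons y ys ihy =>
      simp only [mergeL]
      split_ifs with h
      · exact (ih (y :: ys)).cons x
      · exact ((ihy).cons y).trans List.perm_middle.symm

-- merge of two ascending lists is ascending
lemma mergeL_pairwise (xs ys : List Int)
    (hx : xs.Pairwise (· ≤ ·)) (hy : ys.Pairwise (· ≤ ·)) :
    (mergeL xs ys).Pairwise (· ≤ ·) := by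
  induction xs generalizing ys with
  | nil => simp only [mergeL]; exact hy
  | cons x xs ih =>
    induction ys with
    | nil => simp only [mergeL]; exact hx
    | cons y ys ihy =>
      rw [List.pairwise_cons] at hx hy
      simp only [mergeL]
      split_ifs with h
      · refine List.pairwise_cons.mpr ⟨?_, ih (y :: ys) hx.2 (List.pairwise_cons.mpr hy)⟩
        intro z hz
        have hz' : z ∈ xs ++ (y :: ys) := (mergeL_perm xs (y :: ys)).mem_iff.mp hz
        rcases List.mem_append.mp hz' with hz1 | hz2
        · exact hx.1 z hz1
        · rcases List.mem_cons.mp hz2 with rfl | hz3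
          · exact h
          · exact le_trans h (hy.1 z hz3)
      · refine List.pairwise_cons.mpr ⟨?_, ihy hy.2⟩
        intro z hz
        have hz' : z ∈ (x :: xs) ++ ys := (mergeL_perm (x :: xs) ys).mem_iff.mp hz
        rcases List.mem_append.mp hz' with hz1 | hz2
        · rcases List.mem_cons.mp hz1 with rfl | hz3
          · omega
          · exact le_trans (by omega) (hx.1 z hz3)
        · exact hy.1 z hz2

lemma msortL_perm (xs : List Int) : (msortL xs).Perm xs := by
  rw [msortL]
  split_ifs with h
  · exact List.Perm.refl xs
  · refine (mergeL_perm _ _).trans ?_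
    have hp : (msortL (xs.take (xs.length / 2)) ++ msortL (xs.drop (xs.length / 2))).Perm
        (xs.take (xs.length / 2) ++ xs.drop (xs.length / 2)) :=
      List.Perm.append (msortL_perm _) (msortL_perm _)
    rw [List.take_append_drop] at hp
    exact hp
termination_by xs.length
decreasing_by
  · simp only [List.length_take]; omega
  · simp only [List.length_drop]; omega

lemma msortL_pairwise (xs : List Int) : (msortL xs).Pairwise (· ≤ ·) := by
  rw [msortL]
  split_ifs with h
  · match xs, h with
    | [], _ => simp
    | [x], _ => simp
  · exact mergeL_pairwise _ _ (msortL_pairwise _) (msortL_pairwise _)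
termination_by xs.length
decreasing_by
  · simp only [List.length_take]; omega
  · simp only [List.length_drop]; omega

-- B's hand-rolled merge sort computes sorted(xs)
lemma msortL_eq_sorted (xs : List Int) :
    msortL xs = PySem.List.sorted xs (fun x => x) false :=
  (PySem.List.sorted_id_eq_of_perm_of_pairwise xs (msortL xs)
    (msortL_perm xs) (msortL_pairwise xs)).symm

-- sorted(xs, reverse=True) on Ints is the reverse of sorted(xs)
lemma sorted_rev_eq_reverse (xs : List Int) :
    PySem.List.sorted xs (fun x => x) true
      = (PySem.List.sorted xs (fun x => x) false).reverse := by
  have h := PySem.List.eq_of_perm_of_pairwise_le_of_injective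
    (l₁ := (PySem.List.sorted xs (fun x => x) true).reverse)
    (l₂ := PySem.List.sorted xs (fun x => x) false)
    (fun x => x) (fun _ _ h => h)
    ((List.reverse_perm _).trans
      ((PySem.List.sorted_perm xs _ true).trans (PySem.List.sorted_perm xs _ false).symm))
    (List.pairwise_reverse.mpr (PySem.List.sorted_pairwise_rev xs _))
    (PySem.List.sorted_pairwise xs _)
  calc PySem.List.sorted xs (fun x => x) true
      = (PySem.List.sorted xs (fun x => x) true).reverse.reverse := by
        rw [List.reverse_reverse]
    _ = (PySem.List.sorted xs (fun x => x) false).reverse := by rw [h]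

-- closed form of B's loop after j iterations
lemma B_loop (s : List Int) (m r : Int) (j : Nat) :
    (PySem.List.pyRange 0 (j : Int) 1).foldl
        (fun (st : Int × Int) _ => (st.1 + PySem.List.pyGetD s st.2 0, st.2 + m)) (0, r) =
      (((List.range j).map (fun i : Nat => PySem.List.pyGetD s (r + (i : Int) * m) 0)).sum,
       r + (j : Int) * m) := by
  induction j with
  | zero => simp [PySem.List.pyRange_one_eq_nil]
  | succ j ih =>
    have hsplit : PySem.List.pyRange 0 ((j : Int) + 1) 1 =
        PySem.List.pyRange 0 (j : Int) 1 ++ [(j : Int)] :=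
      PySem.List.pyRange_one_succ_right (by positivity)
    rw [show (((j + 1 : Nat)) : Int) = (j : Int) + 1 by push_cast; ring, hsplit,
        List.foldl_append, ih]
    simp only [List.foldl_cons, List.foldl_nil, List.range_succ,
      List.map_append, List.sum_append, List.map_cons, List.map_nil, List.sum_cons,
      List.sum_nil]
    simp only [Prod.mk.injEq]
    constructor <;> ring

-- ===== VERDICT (by name: the statement is the Claim_ definition above) =====
theorem solution_spec : Claim_equal_solution := by
  intro k m score _ hm
  unfold Spec_solution solution solution_alt
  simp only []
  set a := msortL score with hadef
  set d := PySem.List.sorted score (fun x => x) true with hddef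
  have hda : d = a.reverse := by
    rw [hddef, hadef, msortL_eq_sorted, sorted_rev_eq_reverse]
  have halen : a.length = score.length := (msortL_perm score).length_eq
  have hdlen : d.length = score.length := by rw [hda]; simp [halen]
  rw [hdlen, halen]
  set L := PySem.Int.floordiv (score.length : Int) m with hL
  rcases lt_or_gt_of_ne hm with hneg | hpos
  · -- m < 0 : both loops are empty
    have hL0 : L ≤ 0 := floordiv_nonpos (by positivity) hneg
    rw [PySem.List.pyRange_one_eq_nil hL0]
    simp
  · -- m > 0
    have hsorted_d : d.Pairwise (fun a b => b ≤ a) :=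
      PySem.List.sorted_pairwise_rev score (fun x => x)
    have hdm := PySem.Int.floordiv_mul_add_mod (score.length : Int) m
    have hr0 := PySem.Int.mod_nonneg (score.length : Int) hpos
    have hrlt := PySem.Int.mod_lt (score.length : Int) hpos
    have hL0 : 0 ≤ L := by nlinarith
    have hLm : L * m ≤ (score.length : Int) := by rw [hL] at *; omega
    have hLcast : ((L.toNat : Int)) = L := Int.toNat_of_nonneg hL0
    set n := score.length with hn
    set Ln := L.toNat with hLn
    set mn := m.toNat with hmn
    have hmcast : ((mn : Int)) = m := Int.toNat_of_nonneg (by omega)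
    have hmn1 : 0 < mn := by omega
    have hLmn : Ln * mn ≤ n := by
      have hc : ((Ln * mn : Nat) : Int) = L * m := by push_cast; rw [hLcast, hmcast]
      omega
    set rn := n - Ln * mn with hrn
    -- A side
    rw [show L = (Ln : Int) from hLcast.symm]
    rw [A_loop d m Ln]
    -- B side
    rw [B_loop a m ((n : Int) - (Ln : Int) * m) Ln]
    simp only []
    -- rewrite A's summands: the chunk minimum is the boundary element of d, read back in a
    have hAterm : ∀ i ∈ List.range Ln,
        (fun i : Nat => (PySem.List.min? (PySem.List.slice d (some (0 + (i : Int) * m))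
            (some (m + (i : Int) * m))) (fun x => x)).getD 0 * m) i
        = (fun i : Nat => a.getD (rn + (Ln - 1 - i) * mn) 0 * m) i := by
      intro i hi
      have hiL : i < Ln := List.mem_range.mp hi
      show (PySem.List.min? (PySem.List.slice d (some (0 + (i : Int) * m))
            (some (m + (i : Int) * m))) (fun x => x)).getD 0 * m
          = a.getD (rn + (Ln - 1 - i) * mn) 0 * m
      have e1 : (0 : Int) + (i : Int) * m = ((i * mn : Nat) : Int) := by
        push_cast; rw [hmcast]; ring
      have e2 : m + (i : Int) * m = ((i * mn : Nat) : Int) + (mn : Int) := by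
        push_cast; rw [hmcast]; ring
      rw [e1, e2]
      have hle : (i + 1) * mn ≤ d.length := by
        rw [hdlen]
        calc (i + 1) * mn ≤ Ln * mn := Nat.mul_le_mul_right _ (by omega)
          _ ≤ n := hLmn
      rw [chunk_min d hsorted_d mn hmn1 i hle]
      -- d[i*mn + mn - 1] = a[n - 1 - (i*mn + mn - 1)] = a[rn + (Ln-1-i)*mn]
      have hsum2 : (Ln - 1 - i) * mn + (i + 1) * mn = Ln * mn := by
        rw [← Nat.add_mul]; congr 1; omega
      have hexp : (i + 1) * mn = i * mn + mn := by ring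
      have hge2 : (i + 1) * mn ≤ Ln * mn := Nat.mul_le_mul_right _ (by omega)
      have hidx : i * mn + (mn - 1) < d.length := by
        rw [hdlen]; omega
      have hidx' : rn + (Ln - 1 - i) * mn < a.length := by
        rw [halen]; omega
      rw [List.getD_eq_getElem d 0 hidx, List.getD_eq_getElem a 0 hidx']
      congr 1
      simp only [hda, List.getElem_reverse]
      congr 1
      simp only [halen]
      omega
    rw [List.map_congr_left hAterm]
    -- rewrite B's summands
    have hBterm : ∀ i ∈ List.range Ln,
        (fun i : Nat => PySem.List.pyGetD a ((n : Int) - (Ln : Int) * m + (i : Int) * m) 0) i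
        = (fun i : Nat => a.getD (rn + i * mn) 0) i := by
      intro i hi
      have hiL : i < Ln := List.mem_range.mp hi
      show PySem.List.pyGetD a ((n : Int) - (Ln : Int) * m + (i : Int) * m) 0
          = a.getD (rn + i * mn) 0
      have hcast : (n : Int) - (Ln : Int) * m + (i : Int) * m = ((rn + i * mn : Nat) : Int) := by
        rw [hrn]
        push_cast [Nat.cast_sub hLmn]
        rw [hmcast]
      have hlt : rn + i * mn < a.length := by
        rw [halen]
        have h1 : i * mn + mn ≤ Ln * mn := by
          calc i * mn + mn = (i + 1) * mn := by ring
            _ ≤ Ln * mn := Nat.mul_le_mul_right _ (by omega)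
        omega
      rw [hcast, PySem.List.pyGetD_natCast]
    rw [List.map_congr_left hBterm]
    -- both are sums over range Ln of a's selected elements; reflect the index
    have hfin : ∀ (g : Nat → Int), ((List.range Ln).map g).sum = ∑ i ∈ Finset.range Ln, g i := by
      intro g; rfl
    rw [hfin, hfin]
    calc (∑ i ∈ Finset.range Ln, a.getD (rn + (Ln - 1 - i) * mn) 0 * m)
        = (∑ i ∈ Finset.range Ln, a.getD (rn + i * mn) 0 * m) :=
          Finset.sum_range_reflect (fun i => a.getD (rn + i * mn) 0 * m) Ln
      _ = m * ∑ i ∈ Finset.range Ln, a.getD (rn + i * mn) 0 := by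
          rw [Finset.mul_sum]
          exact Finset.sum_congr rfl (fun i _ => by ring)
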